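-- pv_equiv track=rewrite | github.com/AndrewP-GH/yandex-algos | src/s3/partial_sort.py | partial_sort
-- ===== SOURCE A (Python) =====
-- def partial_sort(n, numbers):
--     buckets = 0
--     local_max = 0
--     for i in range(0, n):
--         number = numbers[i]
--         all_more = True
--         for j in range(i + 1, n):
--             all_more &= number < numbers[j] and local_max < numbers[j]
--             if not all_more:
--                 break
--         if all_more or i == n - 1:
--             buckets += 1
--         local_max = max(local_max, number)
--     return buckets
-- ===== SOURCE B (Python) =====
-- def partial_sort(n, numbers):
--     # One pass with precomputed suffix minima instead of the per-index inner rescans.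
--     if n <= 0:
--         return 0
--     xs = numbers[:n]
--     suf = []
--     m = xs[-1]
--     for x in reversed(xs):
--         m = min(m, x)
--         suf.append(m)
--     suf.reverse()
--     buckets = 1
--     pm = 0
--     for x, s in zip(xs, suf[1:]):
--         pm = max(pm, x)
--         if s > pm:
--             buckets += 1
--     return buckets
-- ===== Notes on version B (the rewrite author's own statement) =====
-- stated objective: alternative
-- what changed: Replaced the per-index inner rescan by one precomputed suffix-minimum array and a single prefix-maximum pass that compares suffix min against prefix max at each boundary.
import Mathlib
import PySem

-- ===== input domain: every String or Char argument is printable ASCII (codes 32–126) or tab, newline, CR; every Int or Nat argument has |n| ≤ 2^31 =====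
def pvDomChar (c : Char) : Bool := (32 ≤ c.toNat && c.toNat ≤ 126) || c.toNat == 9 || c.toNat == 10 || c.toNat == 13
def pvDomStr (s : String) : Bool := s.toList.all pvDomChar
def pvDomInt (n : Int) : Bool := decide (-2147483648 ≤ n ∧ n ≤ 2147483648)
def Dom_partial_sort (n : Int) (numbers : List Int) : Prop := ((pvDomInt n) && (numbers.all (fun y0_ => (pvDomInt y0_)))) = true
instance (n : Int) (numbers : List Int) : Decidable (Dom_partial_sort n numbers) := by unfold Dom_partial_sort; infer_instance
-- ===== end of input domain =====

-- B computes the bucket count from one precomputed suffix-minimum array and a single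
-- prefix-maximum pass instead of A's per-index rescans; A = B whenever n ≤ len(numbers).


-- ===== PORT A =====
-- inner loop: 'for j in range(i+1, n): all_more &= …; if not all_more: break'
def pvInnerA (nums : List Int) (number lm : Int) : List Int → Bool
  | [] => true
  | j :: rest =>
    if number < PySem.List.pyGetD nums j 0 ∧ lm < PySem.List.pyGetD nums j 0 then
      pvInnerA nums number lm rest
    else false

def partial_sort (n : Int) (numbers : List Int) : Int :=
  ((PySem.List.pyRange 0 n 1).foldl (fun (s : Int × Int) i =>
      let number := PySem.List.pyGetD numbers i 0
      let all_more := pvInnerA numbers number s.2 (PySem.List.pyRange (i + 1) n 1)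
      ((if all_more = true ∨ i = n - 1 then s.1 + 1 else s.1), max s.2 number))
    (0, 0)).1

-- ===== PORT B =====
-- suffix minima of xs, built back-to-front over reversed(xs) then reversed (Source B's 'suf')
def pvSufB (xs : List Int) : List Int :=
  ((xs.reverse.foldl (fun (st : Int × List Int) x =>
      let m := min st.1 x
      (m, st.2 ++ [min st.1 x]))
    (PySem.List.pyGetD xs (-1) 0, [])).2).reverse

def partial_sort_alt (n : Int) (numbers : List Int) : Int :=
  if n ≤ 0 then 0
  else
    let xs := PySem.List.slice numbers none (some n)
    let suf := pvSufB xs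
    ((xs.zip (PySem.List.slice suf (some 1) none)).foldl (fun (st : Int × Int) p =>
        let pm := max st.2 p.1
        ((if p.2 > pm then st.1 + 1 else st.1), pm))
      (1, 0)).1

-- ===== PRECONDITION & SPEC =====
-- A raises IndexError when n > len(numbers); exactly those inputs are excluded.
def Pre_partial_sort (n : Int) (numbers : List Int) : Prop := n ≤ (numbers.length : Int)
instance (n : Int) (numbers : List Int) : Decidable (Pre_partial_sort n numbers) := by
  unfold Pre_partial_sort; infer_instance
def pvWitness_partial_sort : Int × List Int := (3, [2, 1, 5])

def Spec_partial_sort (n : Int) (numbers : List Int) (out : Int) : Prop := out = partial_sort_alt n numbers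
instance (n : Int) (numbers : List Int) (out : Int) : Decidable (Spec_partial_sort n numbers out) := by unfold Spec_partial_sort; infer_instance

-- ===== CLAIM (what is proved, stated in full; the proofs are below) =====
def Claim_equal_partial_sort : Prop := ∀ (n : Int) (numbers : List Int), Dom_partial_sort n numbers → Pre_partial_sort n numbers → Spec_partial_sort n numbers (partial_sort n numbers)
-- ===== LEMMAS AND PROOFS =====

-- prefix maximum with Python's 0 seed: A's local_max / B's pm after k iterations
def pvPmx (xs : List Int) (k : Nat) : Int := (xs.take k).foldl max 0

-- minimum of the suffix xs.drop k (getD-seeded by its own head)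
def pvSmin (xs : List Int) (k : Nat) : Int := (xs.drop k).foldl min (xs.getD k 0)

theorem pvPmx_succ (xs : List Int) (k : Nat) (hk : k < xs.length) :
    pvPmx xs (k + 1) = max (pvPmx xs k) (xs.getD k 0) := by
  unfold pvPmx
  rw [List.take_add_one, List.getElem?_eq_getElem hk, List.getD_eq_getElem _ _ hk]
  rw [Option.toList_some, List.foldl_append]
  rfl

theorem pvPmx_take (xs : List Int) (N k : Nat) (hk : k ≤ N) :
    pvPmx (xs.take N) k = pvPmx xs k := by
  unfold pvPmx
  rw [List.take_take, min_eq_left hk]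

theorem pv_foldl_min_mem_le (l : List Int) (a : Int) (ha : a ∈ l) :
    l.foldl min a ∈ l ∧ ∀ x ∈ l, l.foldl min a ≤ x := by
  refine ⟨?_, (PySem.List.foldl_min_le l a).2⟩
  rcases PySem.List.foldl_min_mem l a with h | h
  · rwa [h]
  · exact h

theorem pv_foldl_min_eq_perm (l l' : List Int) (a b : Int) (hp : l.Perm l')
    (ha : a ∈ l) (hb : b ∈ l') : l.foldl min a = l'.foldl min b := by
  obtain ⟨m1, le1⟩ := pv_foldl_min_mem_le l a ha
  obtain ⟨m2, le2⟩ := pv_foldl_min_mem_le l' b hb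
  exact le_antisymm (le1 _ (hp.mem_iff.mpr m2)) (le2 _ (hp.mem_iff.mp m1))

theorem pv_getD_mem_drop (xs : List Int) (k : Nat) (hk : k < xs.length) :
    xs.getD k 0 ∈ xs.drop k := by
  rw [List.getD_eq_getElem _ _ hk]
  have h0 : 0 < (xs.drop k).length := by simp; omega
  have : (xs.drop k)[0] = xs[k + 0] := List.getElem_drop (h := h0)
  simp only [Nat.add_zero] at this
  rw [← this]
  exact List.getElem_mem h0

theorem pvSmin_gt_iff (xs : List Int) (k : Nat) (hk : k < xs.length) (v : Int) :
    v < pvSmin xs k ↔ ∀ x ∈ xs.drop k, v < x := by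
  obtain ⟨hm, hle⟩ := pv_foldl_min_mem_le (xs.drop k) (xs.getD k 0) (pv_getD_mem_drop xs k hk)
  unfold pvSmin
  constructor
  · exact fun h x hx => lt_of_lt_of_le h (hle x hx)
  · exact fun h => h _ hm

-- running minima of a list from a seed
def pvRevmins (m : Int) : List Int → List Int
  | [] => []
  | y :: t => min m y :: pvRevmins (min m y) t

theorem pv_foldl_revmins (ys : List Int) (m : Int) (acc : List Int) :
    ys.foldl (fun (st : Int × List Int) x => (min st.1 x, st.2 ++ [min st.1 x])) (m, acc)
      = (ys.foldl min m, acc ++ pvRevmins m ys) := by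
  induction ys generalizing m acc with
  | nil => simp [pvRevmins]
  | cons y t ih => simp [List.foldl_cons, ih, pvRevmins]

theorem pvRevmins_length (m : Int) (ys : List Int) : (pvRevmins m ys).length = ys.length := by
  induction ys generalizing m with
  | nil => rfl
  | cons y t ih => simp [pvRevmins, ih]

theorem pvRevmins_getD (m : Int) (ys : List Int) (k : Nat) (hk : k < ys.length) :
    (pvRevmins m ys).getD k 0 = (ys.take (k + 1)).foldl min m := by
  induction ys generalizing m k with
  | nil => simp at hk
  | cons y t ih =>
    cases k with
    | zero => simp [pvRevmins]
    | succ k =>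
      simp only [pvRevmins, List.take_succ_cons, List.foldl_cons, List.getD_cons_succ]
      exact ih (min m y) k (by simpa using hk)

theorem pvSufB_length (xs : List Int) : (pvSufB xs).length = xs.length := by
  unfold pvSufB
  rw [pv_foldl_revmins]
  simp [pvRevmins_length]

theorem pvSufB_getD (xs : List Int) (k : Nat) (hk : k < xs.length) :
    (pvSufB xs).getD k 0 = pvSmin xs k := by
  have hxs : xs ≠ [] := by intro h; simp [h] at hk
  unfold pvSufB
  rw [pv_foldl_revmins, List.nil_append, PySem.List.pyGetD_neg_one xs 0 hxs]
  have hlen : (pvRevmins (xs.getLast hxs) xs.reverse).length = xs.length := by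
    simp [pvRevmins_length]
  show (pvRevmins (xs.getLast hxs) xs.reverse).reverse.getD k 0 = pvSmin xs k
  rw [List.getD_reverse k (by omega)]
  rw [hlen, pvRevmins_getD _ _ _ (by simp; omega)]
  have htake : xs.reverse.take (xs.length - 1 - k + 1) = (xs.drop k).reverse := by
    rw [List.take_reverse]
    congr 1
    congr 1
    omega
  rw [htake]
  apply pv_foldl_min_eq_perm _ _ _ _ (List.reverse_perm _)
  · have hne : xs.drop k ≠ [] := by simp; omega
    rw [List.mem_reverse, ← List.getLast_drop hne]
    exact List.getLast_mem hne
  · exact pv_getD_mem_drop xs k hk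

-- A's inner break-loop computes the full conjunction over its range
theorem pvInnerA_all (nums : List Int) (number lm : Int) (js : List Int) :
    pvInnerA nums number lm js
      = js.all (fun j => decide (number < PySem.List.pyGetD nums j 0)
                      && decide (lm < PySem.List.pyGetD nums j 0)) := by
  induction js with
  | nil => rfl
  | cons j rest ih =>
    by_cases h : number < PySem.List.pyGetD nums j 0 ∧ lm < PySem.List.pyGetD nums j 0
    · simp [pvInnerA, h, ih]
    · rw [Decidable.not_and_iff_or_not] at h
      rcases h with h | h <;> simp [pvInnerA, h]

-- the loop body of A's outer loop
def pvStepA (numbers : List Int) (n : Int) (s : Int × Int) (i : Int) : Int × Int :=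
  let number := PySem.List.pyGetD numbers i 0
  let all_more := pvInnerA numbers number s.2 (PySem.List.pyRange (i + 1) n 1)
  ((if all_more = true ∨ i = n - 1 then s.1 + 1 else s.1), max s.2 number)

-- A's bucket condition at index i
def pvQA (numbers : List Int) (n : Int) (i : Nat) : Bool :=
  pvInnerA numbers (numbers.getD i 0) (pvPmx numbers i)
      (PySem.List.pyRange ((i : Int) + 1) n 1)
    || decide ((i : Int) = n - 1)

theorem pvA_fold (numbers : List Int) (n : Int) (hlen : n ≤ (numbers.length : Int))
    (k : Nat) (hk : k ≤ n.toNat) :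
    (PySem.List.pyRange 0 (k : Int) 1).foldl (pvStepA numbers n) (0, 0)
      = ((((List.range k).countP (pvQA numbers n)) : Int), pvPmx numbers k) := by
  induction k with
  | zero => simp [PySem.List.pyRange_one_eq_nil (le_refl 0), pvPmx]
  | succ k ih =>
    have hk' : k ≤ n.toNat := by omega
    have hklen : k < numbers.length := by omega
    have hcast : ((k + 1 : Nat) : Int) = (k : Int) + 1 := by push_cast; ring
    rw [hcast, PySem.List.pyRange_one_succ_right (by positivity), List.foldl_append,
      ih hk', List.range_succ, List.countP_append, List.foldl_cons, List.foldl_nil]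
    show pvStepA numbers n (_, _) _ = _
    unfold pvStepA
    simp only [PySem.List.pyGetD_natCast]
    rw [pvPmx_succ numbers k hklen]
    have hiff : (pvInnerA numbers (numbers.getD k 0) (pvPmx numbers k)
          (PySem.List.pyRange ((k : Int) + 1) n 1) = true ∨ (k : Int) = n - 1)
        ↔ pvQA numbers n k = true := by
      unfold pvQA
      rw [Bool.or_eq_true_iff]
      simp
    by_cases hq : pvQA numbers n k = true
    · rw [if_pos (hiff.mpr hq)]
      simp only [List.countP_cons, List.countP_nil, hq, if_pos]
      rw [Prod.mk.injEq]
      refine ⟨by push_cast; ring, rfl⟩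
    · rw [if_neg (fun h => hq (hiff.mp h))]
      have hq' : pvQA numbers n k = false := by simpa using hq
      simp only [List.countP_cons, List.countP_nil, hq']
      rw [Prod.mk.injEq]
      refine ⟨by push_cast; ring, rfl⟩

-- the loop body of B's single pass
def pvStepB (st : Int × Int) (p : Int × Int) : Int × Int :=
  let pm := max st.2 p.1
  ((if p.2 > pm then st.1 + 1 else st.1), pm)

theorem pvB_fold (xs : List Int) (k : Nat) (hk : k + 1 ≤ xs.length) :
    ((List.range k).map (fun i => (xs.getD i 0, pvSmin xs (i + 1)))).foldl pvStepB (1, 0)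
      = (1 + (((List.range k).countP
            (fun i => decide (pvPmx xs (i + 1) < pvSmin xs (i + 1)))) : Int), pvPmx xs k) := by
  induction k with
  | zero => simp [pvPmx]
  | succ k ih =>
    rw [List.range_succ, List.map_append, List.foldl_append, ih (by omega), List.countP_append]
    simp only [List.map_cons, List.map_nil, List.foldl_cons, List.foldl_nil, pvStepB,
      List.countP_cons, List.countP_nil]
    rw [← pvPmx_succ xs k (by omega)]
    by_cases hc : pvPmx xs (k + 1) < pvSmin xs (k + 1)
    · simp [hc]; ring
    · simp [hc]

theorem pvZip_eq (xs : List Int) (hne : xs ≠ []) :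
    xs.zip ((pvSufB xs).tail)
      = (List.range (xs.length - 1)).map (fun i => (xs.getD i 0, pvSmin xs (i + 1))) := by
  have hL : 0 < xs.length := List.length_pos_iff.mpr hne
  have hsl : (pvSufB xs).length = xs.length := pvSufB_length xs
  apply List.ext_getElem
  · simp [hsl]
  · intro i h1 h2
    have hi : i < xs.length - 1 := by simp [hsl] at h1; omega
    rw [List.getElem_zip, List.getElem_map, List.getElem_range]
    have ht : i < (pvSufB xs).tail.length := by simp [hsl]; omega
    rw [List.getElem_tail ht]
    have h3 : i + 1 < (pvSufB xs).length := by omega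
    rw [← List.getD_eq_getElem (pvSufB xs) 0 h3, pvSufB_getD xs (i + 1) (by omega),
      ← List.getD_eq_getElem xs 0 (by omega : i < xs.length)]

theorem pv_getD_take (xs : List Int) (N i : Nat) (hi : i < N) (hiN : i < xs.length) :
    (xs.take N).getD i 0 = xs.getD i 0 := by
  have h : i < (xs.take N).length := by simp; omega
  rw [List.getD_eq_getElem _ _ h, List.getD_eq_getElem _ _ hiN, List.getElem_take]

-- A's condition at an interior index i equals B's boundary test at i+1
theorem pvQA_eq (numbers : List Int) (n : Int) (hn : 0 < n) (hlen : n ≤ (numbers.length : Int))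
    (i : Nat) (hi : i + 1 < n.toNat) :
    pvQA numbers n i
      = decide (pvPmx (numbers.take n.toNat) (i + 1) < pvSmin (numbers.take n.toNat) (i + 1)) := by
  have hNlen : n.toNat ≤ numbers.length := by omega
  have hxl : (numbers.take n.toNat).length = n.toNat := by simp; omega
  have hnN : ((n.toNat : Nat) : Int) = n := by omega
  have h1 : (decide ((i : Int) = n - 1)) = false := by simp; omega
  unfold pvQA
  rw [pvInnerA_all, h1, Bool.or_false, Bool.eq_iff_iff]
  simp only [List.all_eq_true, Bool.and_eq_true, decide_eq_true_eq]
  have hdrop : (numbers.take n.toNat).drop (i + 1)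
      = (PySem.List.pyRange ((i + 1 : Nat) : Int) (((numbers.take n.toNat).length : Nat) : Int) 1).map
        (fun j => PySem.List.pyGetD (numbers.take n.toNat) j 0) := by
    rw [PySem.List.map_pyGetD_pyRange' (numbers.take n.toNat) 0 (by positivity)]
    simp
  have hgd : ∀ j : Int, (i : Int) + 1 ≤ j → j < n →
      PySem.List.pyGetD (numbers.take n.toNat) j 0 = PySem.List.pyGetD numbers j 0 := by
    intro j hj1 hj2
    have hjc : j = ((j.toNat : Nat) : Int) := by omega
    rw [hjc, PySem.List.pyGetD_natCast, PySem.List.pyGetD_natCast,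
      pv_getD_take numbers n.toNat j.toNat (by omega) (by omega)]
  rw [pvPmx_succ (numbers.take n.toNat) i (by omega),
    pvSmin_gt_iff (numbers.take n.toNat) (i + 1) (by omega), hdrop,
    pvPmx_take numbers n.toNat i (by omega),
    pv_getD_take numbers n.toNat i (by omega) (by omega)]
  simp only [List.forall_mem_map, hxl, hnN]
  have hcast : ((i + 1 : Nat) : Int) = (i : Int) + 1 := by push_cast; ring
  rw [hcast]
  constructor
  · intro h j hj
    have hjr := (PySem.List.mem_pyRange_one).mp hj
    obtain ⟨ha, hb⟩ := h j hj
    rw [hgd j hjr.1 hjr.2, max_lt_iff]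
    exact ⟨hb, ha⟩
  · intro h j hj
    have hjr := (PySem.List.mem_pyRange_one).mp hj
    have := h j hj
    rw [hgd j hjr.1 hjr.2, max_lt_iff] at this
    exact ⟨this.2, this.1⟩

-- ===== VERDICT (by name: the statement is the Claim_ definition above) =====
theorem partial_sort_spec : Claim_equal_partial_sort := by
  intro n numbers _ hpre
  unfold Pre_partial_sort at hpre
  unfold Spec_partial_sort
  by_cases hn : n ≤ 0
  · simp [partial_sort, partial_sort_alt, PySem.List.pyRange_one_eq_nil hn, hn]
  · replace hn : 0 < n := by omega
    have hN1 : 1 ≤ n.toNat := by omega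
    have hNlen : n.toNat ≤ numbers.length := by omega
    set N := n.toNat with hNdef
    set xs := numbers.take N with hxs
    have hxl : xs.length = N := by simp [hxs]; omega
    have hne : xs ≠ [] := by
      intro h
      rw [h] at hxl
      simp at hxl
      omega
    have hA : partial_sort n numbers = (((List.range N).countP (pvQA numbers n)) : Int) := by
      have hcast : ((N : Nat) : Int) = n := by omega
      have hfold := pvA_fold numbers n hpre N (le_refl N)
      rw [hcast] at hfold
      exact congrArg Prod.fst hfold
    have hB : partial_sort_alt n numbers
        = 1 + (((List.range (N - 1)).countP
            (fun i => decide (pvPmx xs (i + 1) < pvSmin xs (i + 1)))) : Int) := by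
      unfold partial_sort_alt
      rw [if_neg (by omega)]
      simp only [PySem.List.slice_to numbers (le_of_lt hn), PySem.List.slice_from_one]
      rw [← hNdef, ← hxs, pvZip_eq xs hne]
      simp only [hxl]
      exact congrArg Prod.fst (pvB_fold xs (N - 1) (by omega))
    rw [hA, hB]
    have hsplit : List.range N = List.range (N - 1) ++ [N - 1] := by
      conv_lhs => rw [show N = (N - 1) + 1 by omega]
      rw [List.range_succ]
    have hlast : pvQA numbers n (N - 1) = true := by
      unfold pvQA
      rw [PySem.List.pyRange_one_eq_nil (by omega : n ≤ ((N - 1 : Nat) : Int) + 1)]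
      simp [pvInnerA]
    have hcong : (List.range (N - 1)).countP (pvQA numbers n)
        = (List.range (N - 1)).countP
            (fun i => decide (pvPmx xs (i + 1) < pvSmin xs (i + 1))) := by
      apply List.countP_congr
      intro i hi
      rw [List.mem_range] at hi
      rw [pvQA_eq numbers n hn hpre i (by omega)]
    rw [hsplit, List.countP_append, hcong]
    simp [hlast]
    ring
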